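-- pv_equiv track=rewrite | github.com/TheJPMZ/NecoLanguage | regex.py | transform
-- ===== SOURCE A (Python) =====
-- CHARACTERS = "abcdefghijklmnopqrstuvwxyz" + "ABCDEFGHIJKLMNOPQRSTUVWXYZ" + "0123456789" + "ε" + " "
--
-- def transform(regex: str) -> str:
--     """
--     This function transforms implicit concatenation into explicit concatenation
--     :param regex: String
--     :return: String with explicit concatenation
--     """
--
--     new_regex = ""
--
--     for index, char in enumerate(regex):
--
--         if char in CHARACTERS + "(" and index != 0:
--             if regex[index - 1] in CHARACTERS + ")" + "*+?":
--                 new_regex += "."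
--         new_regex += char
--
--     return new_regex
-- ===== SOURCE B (Python) =====
-- CHARACTERS = "abcdefghijklmnopqrstuvwxyz" + "ABCDEFGHIJKLMNOPQRSTUVWXYZ" + "0123456789" + "\u03b5" + " "
--
-- PREV_OK = frozenset(CHARACTERS + ")*+?")
-- CUR_OK = frozenset(CHARACTERS + "(")
--
-- def transform(regex: str) -> str:
--     """Staged: compute the concat-boundary cut positions, slice the regex into
--     segments at those cuts, and join the segments with '.'."""
--     cuts = [i for i in range(1, len(regex))
--             if regex[i - 1] in PREV_OK and regex[i] in CUR_OK]
--     bounds = [0, *cuts, len(regex)]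
--     return '.'.join(regex[a:b] for a, b in zip(bounds, bounds[1:]))
-- ===== Notes on version B (the rewrite author's own statement) =====
-- stated objective: alternative
-- what changed: Replaces A's char-by-char accumulator loop by a staged computation: first the list of concat-boundary cut positions (an index-range filter), then slicing the regex into segments at those cuts and joining the segments with a concatenation dot.
import Mathlib
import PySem

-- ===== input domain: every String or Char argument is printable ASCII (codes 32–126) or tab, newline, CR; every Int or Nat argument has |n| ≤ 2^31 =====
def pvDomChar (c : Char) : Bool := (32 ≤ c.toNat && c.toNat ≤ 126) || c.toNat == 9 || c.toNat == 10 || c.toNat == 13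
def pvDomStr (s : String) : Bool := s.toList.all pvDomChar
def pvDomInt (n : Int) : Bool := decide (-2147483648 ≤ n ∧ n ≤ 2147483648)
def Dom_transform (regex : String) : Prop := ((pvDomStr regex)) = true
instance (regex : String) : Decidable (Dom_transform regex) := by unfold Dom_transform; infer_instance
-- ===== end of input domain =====

-- B replaces A's char-by-char accumulator loop by a staged computation: the list of
-- concat-boundary cut positions, then slicing into segments joined with concatenation dots (objective: alternative).

-- the module constant CHARACTERS
def pvCHARACTERS : List Char :=
  "abcdefghijklmnopqrstuvwxyzABCDEFGHIJKLMNOPQRSTUVWXYZ0123456789ε ".toList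

-- ===== PORT A =====
-- 'char in CHARACTERS + "("' (single char in string = membership)
def pvCurA (c : Char) : Bool := (pvCHARACTERS ++ "(".toList).contains c
-- 'regex[index-1] in CHARACTERS + ")" + "*+?"'
def pvPrevA (c : Char) : Bool := (pvCHARACTERS ++ ")*+?".toList).contains c

-- literal port of A's enumerate loop; new_regex built as List Char, String.mk at return.
-- regex[index-1]: PySem.Str.pyGet? with a default that is never used (index ≥ 1 there).
def transform (regex : String) : String :=
  String.mk ((PySem.List.enumerate regex.toList 0).foldl
    (fun acc ic =>
      (if pvCurA ic.2 ∧ ic.1 ≠ 0 then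
        (if pvPrevA ((PySem.Str.pyGet? regex (ic.1 - 1)).getD ' ') then acc ++ ['.'] else acc)
       else acc) ++ [ic.2])
    [])

-- ===== PORT B =====
-- regex[a:b] for 0 ≤ a ≤ b ≤ len: drop/take is exact on this in-range slice
def pvSeg (cs : List Char) (a b : Nat) : List Char := (cs.drop a).take (b - a)

-- port of Source B: cut positions (range(1, len) with always-in-range indexing regex[i-1], regex[i],
-- exact as Nat indices with getD), bounds = [0, *cuts, len], then str.join of the slices.
def transform_alt (regex : String) : String :=
  let cs := regex.toList
  let cuts := (List.range' 1 (cs.length - 1)).filter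
      (fun i => pvPrevA (cs.getD (i - 1) ' ') ∧ pvCurA (cs.getD i ' '))
  let bounds := 0 :: (cuts ++ [cs.length])
  String.mk (List.intercalate ['.']
    ((bounds.zip bounds.tail).map (fun ab => pvSeg cs ab.1 ab.2)))

-- ===== PRECONDITION & SPEC =====
def Spec_transform (regex : String) (out : String) : Prop := out = transform_alt regex
instance (regex : String) (out : String) : Decidable (Spec_transform regex out) := by unfold Spec_transform; infer_instance

-- ===== CLAIM (what is proved, stated in full; the proofs are below) =====
def Claim_equal_transform : Prop := ∀ (regex : String), Dom_transform regex → Spec_transform regex (transform regex)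

-- ===== LEMMAS AND PROOFS =====

-- reference shape: the dots-and-chars emitted after an already-seen character p
def pvRefT (p : Char) : List Char → List Char
  | [] => []
  | c :: rest => (if pvPrevA p ∧ pvCurA c then ['.'] else []) ++ c :: pvRefT c rest

lemma pv_afold (regex : String) (cs : List Char) :
    ∀ (pre : List Char) (p : Char) (acc : List Char),
      regex.toList = pre ++ p :: cs →
      (PySem.List.enumerate cs ((pre.length : Int) + 1)).foldl
        (fun acc ic =>
          (if pvCurA ic.2 ∧ ic.1 ≠ 0 then
            (if pvPrevA ((PySem.Str.pyGet? regex (ic.1 - 1)).getD ' ') then acc ++ ['.'] else acc)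
           else acc) ++ [ic.2])
        acc
      = acc ++ pvRefT p cs := by
  induction cs with
  | nil => intro pre p acc h; simp [PySem.List.enumerate_nil, pvRefT]
  | cons c rest ih =>
    intro pre p acc h
    rw [PySem.List.enumerate_cons]
    simp only [List.foldl_cons]
    have hget : PySem.Str.pyGet? regex (((pre.length : Int) + 1) - 1) = some p := by
      simp only [add_sub_cancel_right]
      simp only [PySem.Str.pyGet?_eq, PySem.Chars.pyGet?_eq_listPyGet?, h]
      exact PySem.List.pyGet?_append_length pre (c :: rest) p
    have hne : ((pre.length : Int) + 1) ≠ 0 := by positivity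
    have h' : regex.toList = (pre ++ [p]) ++ c :: rest := by simpa using h
    have := ih (pre ++ [p]) c
      ((if pvCurA c ∧ ((pre.length : Int) + 1) ≠ 0 then
          (if pvPrevA ((PySem.Str.pyGet? regex (((pre.length : Int) + 1) - 1)).getD ' ')
           then acc ++ ['.'] else acc)
        else acc) ++ [c]) h'
    rw [show ((((pre ++ [p]).length : Int)) + 1) = ((pre.length : Int) + 1) + 1 by
          simp [List.length_append]] at this
    rw [this, hget]
    simp only [Option.getD_some, hne, ne_eq, not_false_iff, and_true, pvRefT]
    by_cases h1 : pvCurA c <;> by_cases h2 : pvPrevA p <;>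
      simp [h1, h2, List.append_assoc]

-- splice reference for B: segments between consecutive cuts, '.' between them
def pvSplice (cs : List Char) : Nat → List Nat → List Char
  | j, [] => cs.drop j
  | j, k :: ks => pvSeg cs j k ++ '.' :: pvSplice cs k ks

lemma pv_intercalate (cs : List Char) :
    ∀ (ks : List Nat) (j : Nat),
      List.intercalate ['.']
        (((j :: (ks ++ [cs.length])).zip (ks ++ [cs.length])).map
          (fun ab => pvSeg cs ab.1 ab.2))
      = pvSplice cs j ks := by
  intro ks
  induction ks with
  | nil =>
    intro j
    simp [pvSplice, pvSeg, List.intercalate, List.take_of_length_le]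
  | cons k ks ih =>
    intro j
    simp only [List.cons_append, List.zip_cons_cons, List.map_cons, pvSplice]
    rw [← ih k]
    have hne : (((k :: (ks ++ [cs.length])).zip (ks ++ [cs.length])).map
        (fun ab => pvSeg cs ab.1 ab.2)) ≠ [] := by
      cases ks <;> simp
    rcases List.exists_cons_of_ne_nil hne with ⟨x, l, hx⟩
    rw [hx]
    simp [List.intercalate, List.intersperse]

lemma pv_peel (cs : List Char) (j : Nat) (p : Char) (tl : List Char)
    (h : cs.drop j = p :: tl) :
    ∀ (ks : List Nat), (∀ k ∈ ks, j + 1 ≤ k) →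
      pvSplice cs j ks = p :: pvSplice cs (j + 1) ks := by
  intro ks hks
  have htl : cs.drop (j + 1) = tl := by
    have := congrArg List.tail h
    simpa [List.tail_drop] using this
  cases ks with
  | nil => simp [pvSplice, h, htl]
  | cons k ks =>
    have hk : j + 1 ≤ k := hks k (by simp)
    simp only [pvSplice]
    have : pvSeg cs j k = p :: pvSeg cs (j + 1) k := by
      unfold pvSeg
      rw [h, htl]
      rw [show k - j = (k - (j + 1)) + 1 by omega]
      simp [List.take_succ_cons]
    rw [this]
    simp

lemma pv_main (cs : List Char) :
    ∀ (rest : List Char) (j : Nat) (p : Char),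
      cs.drop j = p :: rest →
      pvSplice cs j ((List.range' (j + 1) rest.length).filter
        (fun i => pvPrevA (cs.getD (i - 1) ' ') ∧ pvCurA (cs.getD i ' ')))
      = p :: pvRefT p rest := by
  intro rest
  induction rest with
  | nil => intro j p h; simp [pvSplice, pvRefT, h]
  | cons c rest ih =>
    intro j p h
    have htl : cs.drop (j + 1) = c :: rest := by
      have := congrArg List.tail h
      simpa [List.tail_drop] using this
    have hgj : cs[j]? = some p := by
      have : (cs.drop j)[0]? = some p := by simp [h]
      simpa [List.getElem?_drop] using this
    have hgj1 : cs[j + 1]? = some c := by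
      have : (cs.drop (j + 1))[0]? = some c := by simp [htl]
      simpa [List.getElem?_drop] using this
    simp only [List.length_cons, List.range'_succ, List.filter_cons]
    have hseg : pvSeg cs j (j + 1) = [p] := by
      simp [pvSeg, h]
    have ihc := ih (j + 1) c htl
    rw [show j + 1 + 1 = j + 2 from rfl] at *
    by_cases hc : pvPrevA p = true ∧ pvCurA c = true
    · have hd : (decide (pvPrevA (cs.getD (j + 1 - 1) ' ') = true ∧ pvCurA (cs.getD (j + 1) ' ') = true)) = true := by
        simp [List.getD_eq_getElem?_getD, hgj, hgj1, hc.1, hc.2]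
      rw [hd]
      simp only [if_true, pvSplice, hseg, ihc]
      simp [pvRefT, hc.1, hc.2]
    · have hd : (decide (pvPrevA (cs.getD (j + 1 - 1) ' ') = true ∧ pvCurA (cs.getD (j + 1) ' ') = true)) = false := by
        simp only [Nat.add_sub_cancel, List.getD_eq_getElem?_getD, hgj, hgj1, Option.getD_some]
        simpa using hc
      rw [hd]
      simp only [Bool.false_eq_true, if_false]
      have hmem : ∀ k ∈ (List.range' (j + 2) rest.length).filter
          (fun i => pvPrevA (cs.getD (i - 1) ' ') ∧ pvCurA (cs.getD i ' ')), j + 1 ≤ k := by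
        intro k hk
        have h1 := (List.mem_filter.mp hk).1
        have h2 := (List.mem_range'_1.mp h1).1
        omega
      rw [pv_peel cs j p (c :: rest) h _ hmem, ihc]
      simp [pvRefT, hc]

-- ===== VERDICT (by name: the statement is the Claim_ definition above) =====
theorem transform_spec : Claim_equal_transform := by
  intro regex _
  unfold Spec_transform transform transform_alt
  rcases h : regex.toList with _ | ⟨c, cs⟩
  · simp [PySem.List.enumerate_nil, pvSeg]; rfl
  · rw [PySem.List.enumerate_cons]
    simp only [List.foldl_cons, zero_add]
    have h0 : ¬(pvCurA c ∧ (0 : Int) ≠ 0) := by simp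
    rw [if_neg h0]
    have ha := pv_afold regex cs [] c ([] ++ [c]) (by simpa using h)
    simp only [List.length_nil, Nat.cast_zero, zero_add, List.nil_append] at ha ⊢
    rw [ha]
    have hm := pv_main (c :: cs) cs 0 c (by simp)
    have hi := pv_intercalate (c :: cs)
      ((List.range' 1 cs.length).filter
        (fun i => pvPrevA ((c :: cs).getD (i - 1) ' ') ∧ pvCurA ((c :: cs).getD i ' '))) 0
    simp only [List.length_cons, Nat.add_sub_cancel, List.tail_cons, zero_add] at hm hi ⊢
    rw [hi, hm]
    simp
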